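-- pv_equiv track=rewrite | github.com/Vexus1/advent_of_code | day3.py | maping
-- ===== SOURCE A (Python) =====
-- def maping(data, key):
--     number = ''
--     values =  []
--     map = {}
--     for i, string in enumerate(data):
--         for j, char in enumerate(string):
--             if char in key:
--                 number += char
--                 values.append([i, j])
--             elif char not in key and number != '':
--                 if number in map.keys():
--                     map[number] += [values]
--                 else:
--                     map[number] = [values]
--                 number = ''
--                 values = []
--             if j == len(string)-1:
--                 if number != '':
--                     if number in map.keys():
--                         map[number] += [values]
--                     else:
--                         map[number] = [values]
--                 number = ''
--                 values = []
--
--     return map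
-- ===== SOURCE B (Python) =====
-- def maping(data, key):
--     keyset = set(key)
--     result = {}
--     for i, row in enumerate(data):
--         n = len(row)
--         j = 0
--         while j < n:
--             if row[j] in keyset:
--                 start = j
--                 while j < n and row[j] in keyset:
--                     j += 1
--                 result.setdefault(row[start:j], []).append([[i, col] for col in range(start, j)])
--             else:
--                 j += 1
--     return result
-- ===== Notes on version B (the rewrite author's own statement) =====
-- stated objective: simpler
-- what changed: A's character-by-character state machine (number/values accumulators with flush-on-non-key and flush-at-end-of-row branches) is replaced by a two-pointer scan per row that slices out each maximal run of key characters and setdefault-appends its coordinate list.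
import Mathlib
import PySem

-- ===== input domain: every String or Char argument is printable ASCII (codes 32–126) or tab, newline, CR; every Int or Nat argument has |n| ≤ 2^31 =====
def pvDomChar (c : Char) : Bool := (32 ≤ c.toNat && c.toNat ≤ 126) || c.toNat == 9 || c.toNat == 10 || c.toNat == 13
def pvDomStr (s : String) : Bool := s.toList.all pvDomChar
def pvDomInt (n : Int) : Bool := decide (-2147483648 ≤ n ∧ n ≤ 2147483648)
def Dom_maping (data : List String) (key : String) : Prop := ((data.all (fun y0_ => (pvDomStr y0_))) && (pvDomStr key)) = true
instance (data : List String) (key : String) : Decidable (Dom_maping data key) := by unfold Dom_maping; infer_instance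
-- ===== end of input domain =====

-- B replaces A's char-by-char flush state machine with a two-pointer scan that slices out each
-- maximal run of key characters and setdefault-appends its coordinates (objective: simpler).

abbrev pvD := PySem.Dict String (List (List (List Int)))

-- ===== PORT A =====
-- 'char in key' (substring test on a 1-char string)
def pvP (key : String) (c : Char) : Bool := PySem.Chars.isIn [c] key.toList

-- 'if number in map: map[number] += [values] else: map[number] = [values]'
def pvFlushA (m : pvD) (num : String) (vals : List (List Int)) : pvD :=
  if m.contains num then m.insert num ((m.get? num).getD [] ++ [vals])
  else m.insert num [vals]

-- body of A's inner loop: state (number, values, map), element (j, char); n = len(string)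
def pvStepA (key : String) (n i : Int) (st : List Char × List (List Int) × pvD)
    (jc : Int × Char) : List Char × List (List Int) × pvD :=
  let st1 :=
    if pvP key jc.2 then (st.1 ++ [jc.2], st.2.1 ++ [[i, jc.1]], st.2.2)
    else if pvP key jc.2 = false ∧ st.1 ≠ [] then
      ([], [], pvFlushA st.2.2 (String.ofList st.1) st.2.1)
    else st
  if jc.1 = n - 1 then
    ([], [], if st1.1 ≠ [] then pvFlushA st1.2.2 (String.ofList st1.1) st1.2.1 else st1.2.2)
  else st1

def maping (data : List String) (key : String) : List (String × List (List (List Int))) :=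
  ((PySem.List.enumerate data 0).foldl
      (fun st is =>
        (PySem.List.enumerate is.2.toList 0).foldl (pvStepA key (PySem.Str.len is.2) is.1) st)
      (([] : List Char), ([] : List (List Int)), PySem.Dict.empty)).2.2.items

-- ===== PORT B =====
-- B's row scan: while j < n, either skip a non-key char or consume the whole run starting at j
-- (the inner 'while' is ported as takeWhile/dropWhile) and setdefault-append its coordinates.
def pvRowB (ks : PySem.Set Char) (i : Int) : Int → List Char → pvD → pvD
  | _, [], m => m
  | j, c :: rest, m =>
    if PySem.Set.contains ks c then
      let run := c :: rest.takeWhile (fun d => PySem.Set.contains ks d)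
      let rest' := rest.dropWhile (fun d => PySem.Set.contains ks d)
      let coords := (PySem.List.pyRange j (j + (run.length : Int)) 1).map (fun col => [i, col])
      pvRowB ks i (j + (run.length : Int)) rest'
        (m.modify (String.ofList run) [] (fun l => l ++ [coords]))
    else pvRowB ks i (j + 1) rest m
  termination_by _ cs _ => cs.length
  decreasing_by
  · have := List.length_dropWhile_le (fun d => PySem.Set.contains ks d) rest
    simp only [List.length_cons]; omega
  · simp

def maping_alt (data : List String) (key : String) : List (String × List (List (List Int))) :=
  ((PySem.List.enumerate data 0).foldl
      (fun m is => pvRowB (PySem.Set.ofList key.toList) is.1 0 is.2.toList m)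
      PySem.Dict.empty).items

-- ===== PRECONDITION & SPEC =====
def Spec_maping (data : List String) (key : String) (out : List (String × List (List (List Int)))) : Prop := out = maping_alt data key
instance (data : List String) (key : String) (out : List (String × List (List (List Int)))) : Decidable (Spec_maping data key out) := by unfold Spec_maping; infer_instance

-- ===== CLAIM (what is proved, stated in full; the proofs are below) =====
def Claim_equal_maping : Prop := ∀ (data : List String) (key : String), Dom_maping data key → Spec_maping data key (maping data key)

-- ===== LEMMAS AND PROOFS =====

-- membership in set(key) is membership in key
theorem pvP_eq (key : String) (c : Char) :
    PySem.Set.contains (PySem.Set.ofList key.toList) c = pvP key c := by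
  unfold pvP
  rw [Bool.eq_iff_iff, PySem.Set.contains_iff, PySem.Set.mem_ofList, PySem.Chars.isIn_iff_infix]
  constructor
  · intro h
    obtain ⟨a, b, hab⟩ := List.mem_iff_append.mp h
    exact ⟨a, b, by rw [hab]; simp⟩
  · intro h; exact h.subset (List.mem_singleton_self c)

-- pvFlushA is exactly setdefault-append (= Dict.modify with default [])
theorem pvFlushA_eq_modify (m : pvD) (num : String) (vals : List (List Int)) :
    pvFlushA m num vals = m.modify num [] (fun l => l ++ [vals]) := by
  unfold pvFlushA PySem.Dict.modify
  by_cases h : m.contains num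
  · simp [h, PySem.Dict.getD_eq_get?_getD]
  · have h' : m.contains num = false := by simpa using h
    rw [PySem.Dict.getD_of_not_contains _ _ h']
    simp [h']

-- proof-side mirror of A's inner loop as a recursion on the remaining characters
def pvF (key : String) (i : Int) : List Char → Int → List Char → List (List Int) → pvD → pvD
  | [], _, _, _, m => m
  | [c], j, num, vals, m =>
      if pvP key c then pvFlushA m (String.ofList (num ++ [c])) (vals ++ [[i, j]])
      else if num = [] then m else pvFlushA m (String.ofList num) vals
  | c :: c' :: rest, j, num, vals, m =>
      if pvP key c then pvF key i (c' :: rest) (j + 1) (num ++ [c]) (vals ++ [[i, j]]) m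
      else if num = [] then pvF key i (c' :: rest) (j + 1) num vals m
      else pvF key i (c' :: rest) (j + 1) [] [] (pvFlushA m (String.ofList num) vals)

def pvCoords (i j : Int) (len : Nat) : List (List Int) :=
  (PySem.List.pyRange j (j + (len : Int)) 1).map (fun col => [i, col])

theorem pvCoords_zero (i j : Int) : pvCoords i j 0 = [] := by
  simp [pvCoords, PySem.List.pyRange]

theorem pvCoords_succ (i j : Int) (len : Nat) :
    pvCoords i j (len + 1) = [i, j] :: pvCoords i (j + 1) len := by
  unfold pvCoords
  rw [PySem.List.pyRange_one_cons (by omega)]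
  have h : j + ((len + 1 : Nat) : Int) = (j + 1) + (len : Int) := by push_cast; ring
  rw [h]
  simp

-- A's inner fold over a nonempty row is pvF
theorem pvStepA_mid (key : String) (n i : Int) (num : List Char) (vals : List (List Int))
    (m : pvD) (j : Int) (c : Char) (hj : ¬ j = n - 1) :
    pvStepA key n i (num, vals, m) (j, c) =
      (if pvP key c then (num ++ [c], vals ++ [[i, j]], m)
       else if num = [] then (num, vals, m)
       else ([], [], pvFlushA m (String.ofList num) vals)) := by
  unfold pvStepA
  by_cases hp : pvP key c
  · simp [hp, hj]
  · by_cases hnum : num = [] <;> simp [hp, hnum, hj]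

theorem pvRowA_eq_pvF (key : String) (i : Int) :
    ∀ (cs : List Char) (c : Char) (j : Int) (num : List Char) (vals : List (List Int)) (m : pvD)
      (n : Int), n = j + 1 + (cs.length : Int) →
      List.foldl (pvStepA key n i) (num, vals, m) (PySem.List.enumerate (c :: cs) j)
        = ([], [], pvF key i (c :: cs) j num vals m) := by
  intro cs
  induction cs with
  | nil =>
    intro c j num vals m n hn
    simp only [PySem.List.enumerate_cons, PySem.List.enumerate_nil, List.foldl_cons,
      List.foldl_nil, List.length_nil] at *
    have hj : j = n - 1 := by omega
    unfold pvStepA pvF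
    by_cases hp : pvP key c
    · simp [hp, hj]
    · by_cases hnum : num = [] <;> simp [hp, hnum, hj]
  | cons c' rest ih =>
    intro c j num vals m n hn
    simp only [List.length_cons] at hn
    have hj : ¬ (j = n - 1) := by omega
    have hn' : n = (j + 1) + 1 + (rest.length : Int) := by push_cast at hn ⊢; omega
    rw [PySem.List.enumerate_cons, List.foldl_cons, pvStepA_mid key n i num vals m j c hj]
    by_cases hp : pvP key c
    · rw [if_pos hp, ih c' (j+1) _ _ _ n hn']
      conv_rhs => rw [pvF]
      simp [hp]
    · by_cases hnum : num = []
      · rw [if_neg (by simp [hp]), if_pos hnum, ih c' (j+1) _ _ _ n hn']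
        conv_rhs => rw [pvF]
        simp [hp, hnum]
      · rw [if_neg (by simp [hp]), if_neg hnum, ih c' (j+1) _ _ _ n hn']
        conv_rhs => rw [pvF]
        simp [hp, hnum]

-- tail driver: what remains to do after a maximal run (or leading non-key char) is consumed
def pvTail (key : String) (i j : Int) (m : pvD) : List Char → pvD
  | [] => m
  | _ :: r' => pvF key i r' j [] [] m

theorem pvCoords_one (i j : Int) : pvCoords i j 1 = [[i, j]] := by
  rw [show (1:Nat) = 0 + 1 from rfl, pvCoords_succ, pvCoords_zero]

-- run absorption: pvF consumes a maximal key-run (plus a pending prefix) in one step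
theorem pvF_absorb (key : String) (i : Int) :
    ∀ (cs : List Char) (j : Int) (num : List Char) (vals : List (List Int)) (m : pvD),
      cs ≠ [] → (num = [] → vals = []) →
      pvF key i cs j num vals m =
        pvTail key i (j + ((cs.takeWhile (pvP key)).length : Int) + 1)
          (if num ++ cs.takeWhile (pvP key) = [] then m
           else pvFlushA m (String.ofList (num ++ cs.takeWhile (pvP key)))
                  (vals ++ pvCoords i j (cs.takeWhile (pvP key)).length))
          (cs.dropWhile (pvP key)) := by
  intro cs
  induction cs with
  | nil => intro _ _ _ _ h _; exact absurd rfl h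
  | cons c rest ih =>
    intro j num vals m _ h0
    by_cases hp : pvP key c
    · simp only [List.takeWhile_cons, hp, if_pos, List.dropWhile_cons]
      cases rest with
      | nil =>
        simp only [List.takeWhile_nil, List.dropWhile_nil, pvTail]
        rw [pvF]
        simp only [hp, if_pos]
        rw [if_neg (by simp)]
        simp [pvCoords_one]
      | cons c' r2 =>
        rw [pvF, if_pos hp, ih (j+1) (num ++ [c]) (vals ++ [[i, j]]) m (by simp) (by simp)]
        congr 1
        · simp only [List.length_cons]; push_cast; ring
        · rw [if_neg (by simp), if_neg (by simp)]
          simp [List.length_cons, pvCoords_succ, List.append_assoc]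
    · simp only [List.takeWhile_cons, hp, Bool.false_eq_true, if_false, List.dropWhile_cons,
        List.length_nil, List.append_nil, Nat.cast_zero, pvCoords_zero, pvTail]
      cases rest with
      | nil =>
        by_cases hnum : num = [] <;> simp [pvF, hp, hnum]
      | cons c' r2 =>
        rw [show pvF key i (c :: c' :: r2) j num vals m
              = if pvP key c = true then pvF key i (c' :: r2) (j + 1) (num ++ [c]) (vals ++ [[i, j]]) m
                else if num = [] then pvF key i (c' :: r2) (j + 1) num vals m
                else pvF key i (c' :: r2) (j + 1) [] [] (pvFlushA m (String.ofList num) vals) from rfl]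
        simp only [hp, Bool.false_eq_true, if_false]
        by_cases hnum : num = []
        · rw [if_pos hnum, hnum, h0 hnum]
          rw [if_pos rfl]
          congr 1
          omega
        · rw [if_neg hnum, if_neg hnum]
          congr 1
          omega

-- head of dropWhile fails the predicate
theorem pvDropHead {p : Char → Bool} {l : List Char} {d : Char} {r : List Char}
    (h : l.dropWhile p = d :: r) : p d = false := by
  have := List.head_dropWhile_not p (l := l) (by simp [h])
  simpa [h] using this

theorem pvTakeDropLen (p : Char → Bool) (l : List Char) :
    (l.takeWhile p).length + (l.dropWhile p).length = l.length := by
  conv_rhs => rw [← List.takeWhile_append_dropWhile (p := p) (l := l)]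
  rw [List.length_append]

-- pvF from a clean state is B's row scan
theorem pvF_eq_pvRowB (key : String) (i : Int) :
    ∀ (N : Nat) (cs : List Char), cs.length ≤ N → ∀ (j : Int) (m : pvD),
      pvF key i cs j [] [] m = pvRowB (PySem.Set.ofList key.toList) i j cs m := by
  have hfun : (fun d => PySem.Set.contains (PySem.Set.ofList key.toList) d) = pvP key :=
    funext (fun d => by rw [pvP_eq])
  intro N
  induction N with
  | zero =>
    intro cs hcs j m
    have : cs = [] := by cases cs <;> simp_all
    subst this
    rw [pvF, pvRowB]
  | succ N ih =>
    intro cs hcs j m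
    cases cs with
    | nil => rw [pvF, pvRowB]
    | cons c rest =>
      by_cases hp : pvP key c
      · rw [pvF_absorb key i (c :: rest) j [] [] m (by simp) (by simp)]
        have htw : (c :: rest).takeWhile (pvP key) = c :: rest.takeWhile (pvP key) := by
          simp [hp]
        have hdwc : (c :: rest).dropWhile (pvP key) = rest.dropWhile (pvP key) := by
          simp [hp]
        rw [htw, hdwc, List.nil_append, if_neg (by simp), pvFlushA_eq_modify]
        conv_rhs => rw [pvRowB, hfun, pvP_eq key c]
        rw [if_pos hp]
        have hm' : PySem.Dict.modify m (String.ofList (c :: rest.takeWhile (pvP key))) []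
              (fun l => l ++ [[] ++ pvCoords i j (c :: rest.takeWhile (pvP key)).length])
            = PySem.Dict.modify m (String.ofList (c :: rest.takeWhile (pvP key))) []
              (fun l => l ++ [(PySem.List.pyRange j
                  (j + ((c :: rest.takeWhile (pvP key)).length : Int)) 1).map
                    (fun col => [i, col])]) := by
          simp [pvCoords]
        rw [hm']
        cases hdw : rest.dropWhile (pvP key) with
        | nil =>
          simp only [pvTail]
          rw [pvRowB]
        | cons d r' =>
          simp only [pvTail]
          conv_rhs => rw [pvRowB, hfun, pvP_eq key d]
          rw [if_neg (by simp [pvDropHead hdw])]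
          exact ih r' (by
              have h1 := pvTakeDropLen (pvP key) rest
              rw [hdw] at h1
              simp only [List.length_cons] at hcs h1 ⊢
              omega) _ _
      · conv_rhs => rw [pvRowB, hfun, pvP_eq key c]
        rw [if_neg (by simp [hp])]
        cases rest with
        | nil =>
          simp [pvF, hp, pvRowB]
        | cons c' r2 =>
          rw [show pvF key i (c :: c' :: r2) j [] [] m
                = if pvP key c = true then pvF key i (c' :: r2) (j + 1) ([] ++ [c]) ([] ++ [[i, j]]) m
                  else if ([] : List Char) = [] then pvF key i (c' :: r2) (j + 1) [] [] m
                  else pvF key i (c' :: r2) (j + 1) [] [] (pvFlushA m (String.ofList []) []) from rfl]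
          simp only [hp, Bool.false_eq_true, if_false]
          exact ih (c' :: r2) (by simp at hcs ⊢; omega) (j + 1) m

-- outer loop: the whole fold over the rows
theorem pvOuter (key : String) :
    ∀ (rows : List String) (i0 : Int) (m : pvD),
      (PySem.List.enumerate rows i0).foldl
          (fun st is =>
            (PySem.List.enumerate is.2.toList 0).foldl (pvStepA key (PySem.Str.len is.2) is.1) st)
          (([] : List Char), ([] : List (List Int)), m)
        = ([], [], (PySem.List.enumerate rows i0).foldl
            (fun m is => pvRowB (PySem.Set.ofList key.toList) is.1 0 is.2.toList m) m) := by
  intro rows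
  induction rows with
  | nil => intro i0 m; simp [PySem.List.enumerate_nil]
  | cons s rows ih =>
    intro i0 m
    rw [PySem.List.enumerate_cons, List.foldl_cons, List.foldl_cons]
    show List.foldl _
        (List.foldl (pvStepA key (PySem.Str.len s) i0) ([], [], m) (PySem.List.enumerate s.toList 0))
        (PySem.List.enumerate rows (i0 + 1))
      = ([], [], List.foldl _
          (pvRowB (PySem.Set.ofList key.toList) i0 0 s.toList m) (PySem.List.enumerate rows (i0 + 1)))
    cases hs : s.toList with
    | nil =>
      rw [PySem.List.enumerate_nil, List.foldl_nil, ih, pvRowB]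
    | cons c cs =>
      rw [pvRowA_eq_pvF key i0 cs c 0 [] [] m (PySem.Str.len s)
          (by rw [PySem.Str.len_eq, hs]; push_cast; simp; ring)]
      rw [pvF_eq_pvRowB key i0 (c :: cs).length (c :: cs) le_rfl 0 m, ih]

-- ===== VERDICT (by name: the statement is the Claim_ definition above) =====
theorem maping_spec : Claim_equal_maping := by
  intro data key _
  unfold Spec_maping maping maping_alt
  rw [pvOuter]
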